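-- pv_equiv track=rewrite | github.com/brookcs3/standalone-mcp-todo | standalone-todo-mcp/src/todo_base.py | filter_todos
-- ===== SOURCE A (Python) =====
-- from typing import Any
--
-- def filter_todos(
--
--     todos: list[dict[str, Any]],
--     status: str | None = None,
--     priority: str | None = None
-- ) -> list[dict[str, Any]]:
--     """Filter todos by status and/or priority.
--
--     Args:
--         todos: List of todo items
--         status: Optional status filter
--         priority: Optional priority filter
--
--     Returns:
--         Filtered list of todos
--     """
--     filtered = todos
--
--     if status:
--         filtered = [t for t in filtered if t.get("status") == status]
--
--     if priority:
--         filtered = [t for t in filtered if t.get("priority") == priority]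
--
--     return filtered
-- ===== SOURCE B (Python) =====
-- def filter_todos(todos, status=None, priority=None):
--     """Filter todos by status and/or priority: one explicit pass with an
--     early-return keep() predicate instead of staged filter passes."""
--     if not status and not priority:
--         return todos
--
--     def keep(t):
--         if status and t.get("status") != status:
--             return False
--         if priority and t.get("priority") != priority:
--             return False
--         return True
--
--     result = []
--     for t in todos:
--         if keep(t):
--             result.append(t)
--     return result
-- ===== Notes on version B (the rewrite author's own statement) =====
-- stated objective: alternative
-- what changed: Replaces A's up-to-two staged list-comprehension filter passes with a single explicit accumulator loop over the todos using an early-return keep() predicate combining both conditions.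
import Mathlib
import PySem

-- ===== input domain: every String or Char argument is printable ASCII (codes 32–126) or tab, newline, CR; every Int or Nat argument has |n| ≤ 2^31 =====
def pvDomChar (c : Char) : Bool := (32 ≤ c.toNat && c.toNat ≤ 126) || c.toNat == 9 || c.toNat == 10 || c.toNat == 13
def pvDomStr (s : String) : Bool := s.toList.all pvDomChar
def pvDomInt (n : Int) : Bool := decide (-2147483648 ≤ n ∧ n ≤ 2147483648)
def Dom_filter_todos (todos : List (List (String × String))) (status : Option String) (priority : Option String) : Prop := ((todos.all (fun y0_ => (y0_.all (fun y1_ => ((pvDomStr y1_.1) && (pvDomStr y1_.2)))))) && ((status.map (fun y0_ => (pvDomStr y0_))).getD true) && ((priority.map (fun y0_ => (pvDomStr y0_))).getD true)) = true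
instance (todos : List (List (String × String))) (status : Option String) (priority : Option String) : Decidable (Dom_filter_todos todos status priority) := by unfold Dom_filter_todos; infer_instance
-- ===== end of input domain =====

-- B: one explicit accumulator loop with an early-return keep() predicate, instead of
-- A's up-to-two staged filter passes (same cost; return-value equivalence only).
-- ===== PORT A =====
-- Python truthiness of `status` / `priority` (None or "" is falsy)
def pvTruthy (o : Option String) : Bool :=
  match o with
  | none => false
  | some s => s != ""

def filter_todos (todos : List (List (String × String))) (status : Option String) (priority : Option String) : List (List (String × String)) :=
  let filtered := todos
  let filtered := if pvTruthy status then
      filtered.filter (fun t => (PySem.Dict.mk t).get? "status" == status) else filtered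
  let filtered := if pvTruthy priority then
      filtered.filter (fun t => (PySem.Dict.mk t).get? "priority" == priority) else filtered
  filtered

-- ===== PORT B =====
-- keep(t): early-return chain from Source B
def pvKeep (status priority : Option String) (t : List (String × String)) : Bool :=
  if pvTruthy status && (PySem.Dict.mk t).get? "status" != status then false
  else if pvTruthy priority && (PySem.Dict.mk t).get? "priority" != priority then false
  else true

-- the explicit `for t in todos: if keep(t): result.append(t)` loop
def pvLoop (status priority : Option String) : List (List (String × String)) → List (List (String × String)) → List (List (String × String))
  | result, [] => result
  | result, t :: rest =>
      pvLoop status priority (if pvKeep status priority t then result ++ [t] else result) rest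

def filter_todos_alt (todos : List (List (String × String))) (status : Option String) (priority : Option String) : List (List (String × String)) :=
  if !pvTruthy status && !pvTruthy priority then todos
  else pvLoop status priority [] todos

-- ===== PRECONDITION & SPEC =====
def Spec_filter_todos (todos : List (List (String × String))) (status : Option String) (priority : Option String) (out : List (List (String × String))) : Prop := out = filter_todos_alt todos status priority
instance (todos : List (List (String × String))) (status : Option String) (priority : Option String) (out : List (List (String × String))) : Decidable (Spec_filter_todos todos status priority out) := by unfold Spec_filter_todos; infer_instance

-- ===== CLAIM (what is proved, stated in full; the proofs are below) =====
def Claim_equal_filter_todos : Prop := ∀ (todos : List (List (String × String))) (status : Option String) (priority : Option String), Dom_filter_todos todos status priority → Spec_filter_todos todos status priority (filter_todos todos status priority)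

-- ===== LEMMAS AND PROOFS =====
theorem pvLoop_eq_filter (status priority : Option String) (acc l : List (List (String × String))) :
    pvLoop status priority acc l = acc ++ l.filter (pvKeep status priority) := by
  induction l generalizing acc with
  | nil => simp [pvLoop]
  | cons t rest ih =>
      simp only [pvLoop, List.filter]
      cases h : pvKeep status priority t <;> simp [ih]

-- pvKeep as a flat conjunction of the two optional conditions
theorem pvKeep_eq (status priority : Option String) (t : List (String × String)) :
    pvKeep status priority t =
      ((!pvTruthy status || ((PySem.Dict.mk t).get? "status" == status)) &&
       (!pvTruthy priority || ((PySem.Dict.mk t).get? "priority" == priority))) := by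
  unfold pvKeep
  cases hS : ((PySem.Dict.mk t).get? "status" == status) <;>
    cases hP : ((PySem.Dict.mk t).get? "priority" == priority) <;>
    cases pvTruthy status <;> cases pvTruthy priority <;> simp [bne, hS, hP]

-- ===== VERDICT (by name: the statement is the Claim_ definition above) =====
theorem filter_todos_spec : Claim_equal_filter_todos := by
  intro todos status priority _
  unfold Spec_filter_todos filter_todos filter_todos_alt
  cases hs : pvTruthy status <;> cases hp : pvTruthy priority <;>
    simp [pvLoop_eq_filter, List.filter_filter] <;>
    (apply List.filter_congr; intro t _; simp [pvKeep_eq, hs, hp, Bool.and_comm])
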